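-- pv_equiv track=rewrite | github.com/tut-tuuut/advent-of-code-shiny-giggle | 2023/10/code.py | extract_loop
-- ===== SOURCE A (Python) =====
-- def parse_input(raw_input):
--     rows = tuple(raw_input.strip().split())
--     for i, row in enumerate(rows):
--         if "S" in row:
--             s_coords = (i, row.index("S"))
--             return rows, s_coords
--
-- def extract_loop(raw_input):
--     N, S, E, W = "N", "S", "E", "W"
--     connections = {
--         "S": {N, S, E, W},
--         "|": {N, S},
--         "F": {S, E},
--         "L": {N, E},
--         "J": {N, W},
--         "7": {W, S},
--         "-": {E, W},
--         ".": set(),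
--     }
--
--     def find_connected_neighbours(coords):
--         i, j = coords
--         current_point = rows[i][j]
--         to_check = connections[current_point]
--         if N in to_check and i > 0:
--             if S in connections[rows[i - 1][j]]:
--                 yield ((i - 1, j))
--         if W in to_check and j > 0:
--             if E in connections[rows[i][j - 1]]:
--                 yield ((i, j - 1))
--         if E in to_check and j < len(rows[i]) - 1:
--             if W in connections[rows[i][j + 1]]:
--                 yield ((i, j + 1))
--         if S in to_check and i < len(rows) - 1:
--             if N in connections[rows[i + 1][j]]:
--                 yield ((i + 1, j))
--
--     rows, s_coords = parse_input(raw_input)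
--     the_loop = set()
--     the_loop.add(s_coords)
--     to_test = set()
--     for x in find_connected_neighbours(s_coords):
--         to_test.add(x)
--     while len(to_test) > 0:
--         x = to_test.pop()
--         the_loop.add(x)
--         for z in find_connected_neighbours(x):
--             if not z in the_loop:
--                 to_test.add(z)
--     return the_loop
-- ===== SOURCE B (Python) =====
-- def extract_loop(raw_input):
--     connections = {"S": "NSEW", "|": "NS", "F": "SE", "L": "NE",
--                    "J": "NW", "7": "WS", "-": "EW", ".": ""}
--
--     rows = raw_input.strip().split()
--     for i, row in enumerate(rows):
--         j = row.find("S")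
--         if j >= 0:
--             s_coords = (i, j)
--             break
--
--     def neighbours(c):
--         i, j = c
--         for di, dj, out_d, in_d in ((-1, 0, "N", "S"), (0, -1, "W", "E"),
--                                     (0, 1, "E", "W"), (1, 0, "S", "N")):
--             ni, nj = i + di, j + dj
--             if (0 <= ni < len(rows) and 0 <= nj < len(rows[ni])
--                     and out_d in connections[rows[i][j]]
--                     and in_d in connections[rows[ni][nj]]):
--                 yield (ni, nj)
--
--     loop = {s_coords}
--     while True:
--         bigger = loop | {z for x in loop for z in neighbours(x)}
--         if bigger == loop:
--             return loop
--         loop = bigger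
-- ===== Notes on version B (the rewrite author's own statement) =====
-- stated objective: alternative
-- what changed: The worklist flood fill (pop one unexplored cell at a time, push its unseen neighbours) is replaced by a frontier-free naive fixed-point iteration - repeatedly replace the set by its union with the neighbours of ALL its members until it stops growing - and the four hand-written direction if-blocks are replaced by one data-driven loop over a direction table with a bounds-checked connection test.
import Mathlib
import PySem

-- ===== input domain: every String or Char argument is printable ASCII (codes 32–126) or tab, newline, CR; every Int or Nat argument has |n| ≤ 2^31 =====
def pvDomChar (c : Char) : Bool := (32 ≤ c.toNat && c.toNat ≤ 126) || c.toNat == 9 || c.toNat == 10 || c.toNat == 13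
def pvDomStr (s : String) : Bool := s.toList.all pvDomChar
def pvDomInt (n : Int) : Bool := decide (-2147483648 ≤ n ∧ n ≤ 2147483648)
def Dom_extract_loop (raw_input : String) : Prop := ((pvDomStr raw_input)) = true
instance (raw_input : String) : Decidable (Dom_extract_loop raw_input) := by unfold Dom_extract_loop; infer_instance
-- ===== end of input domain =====

-- B replaces the worklist flood fill by a frontier-free naive fixed-point iteration (union the
-- set with the neighbours of ALL its members until it stops growing) with a table-driven
-- neighbour function (objective: alternative). Python's set.pop() / set-iteration order is
-- arbitrary and unobservable in the returned set; the ports fix a concrete order and the proof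
-- shows the resulting lists coincide exactly.

-- ===== PORT A =====
-- 1-character Python strings are modelled as Char (the grid cells and direction names).
def connA : PySem.Dict Char (PySem.Set Char) :=
  PySem.Dict.ofList
    [('S', PySem.Set.ofList ['N','S','E','W']), ('|', PySem.Set.ofList ['N','S']),
     ('F', PySem.Set.ofList ['S','E']), ('L', PySem.Set.ofList ['N','E']),
     ('J', PySem.Set.ofList ['N','W']), ('7', PySem.Set.ofList ['W','S']),
     ('-', PySem.Set.ofList ['E','W']), ('.', PySem.Set.empty)]

-- rows[i][j] (both indices in range whenever A evaluates them under Pre_)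
def cellA (rows : List (List Char)) (i j : Int) : Char :=
  PySem.List.pyGetD (PySem.List.pyGetD rows i []) j ' '

-- find_connected_neighbours: the four if-blocks, yields collected in order N, W, E, S
def fcnA (rows : List (List Char)) (c : Int × Int) : List (Int × Int) :=
  let i := c.1
  let j := c.2
  let toCheck := PySem.Dict.getD connA (cellA rows i j) PySem.Set.empty
  let out0 : List (Int × Int) := []
  let out1 := if PySem.Set.contains toCheck 'N' && decide (0 < i) then
      (if PySem.Set.contains (PySem.Dict.getD connA (cellA rows (i-1) j) PySem.Set.empty) 'S'
       then out0 ++ [(i-1, j)] else out0) else out0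
  let out2 := if PySem.Set.contains toCheck 'W' && decide (0 < j) then
      (if PySem.Set.contains (PySem.Dict.getD connA (cellA rows i (j-1)) PySem.Set.empty) 'E'
       then out1 ++ [(i, j-1)] else out1) else out1
  let out3 := if PySem.Set.contains toCheck 'E' && decide (j < ((PySem.List.pyGetD rows i []).length : Int) - 1) then
      (if PySem.Set.contains (PySem.Dict.getD connA (cellA rows i (j+1)) PySem.Set.empty) 'W'
       then out2 ++ [(i, j+1)] else out2) else out2
  let out4 := if PySem.Set.contains toCheck 'S' && decide (i < (rows.length : Int) - 1) then
      (if PySem.Set.contains (PySem.Dict.getD connA (cellA rows (i+1) j) PySem.Set.empty) 'N'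
       then out3 ++ [(i+1, j)] else out3) else out3
  out4

-- parse_input's scan: first row containing "S"; row.index("S") = Chars.find (present, so equal)
def findSA (rs : List (List Char)) (i : Int) : Option (Int × Int) :=
  match rs with
  | [] => none
  | r :: t => if PySem.Chars.isIn ['S'] r then some (i, PySem.Chars.find r ['S']) else findSA t (i + 1)

-- for z in find_connected_neighbours(x): if z not in the_loop: to_test.add(z)
def addNbrs (theLoop t ns : List (Int × Int)) : List (Int × Int) :=
  ns.foldl (fun t z => if z ∈ theLoop then t else PySem.Set.add t z) t

-- the while-loop; set.pop() modelled as the first element (Python's pop order is arbitrary);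
-- fuel is a totalization guard only, proved never to run out under Pre_
def aRun (nbrs : (Int × Int) → List (Int × Int)) :
    Nat → List (Int × Int) → List (Int × Int) → List (Int × Int)
  | 0, theLoop, _ => theLoop
  | f + 1, theLoop, toTest =>
    match toTest with
    | [] => theLoop
    | x :: rest =>
      let theLoop' := PySem.Set.add theLoop x
      aRun nbrs f theLoop' (addNbrs theLoop' rest (nbrs x))

def extract_loop (raw_input : String) : List (Int × Int) :=
  let rows := PySem.Chars.split₀ (PySem.Chars.strip raw_input.toList)
  match findSA rows 0 with
  | none => []   -- Python: `rows, s_coords = None` unpacking raises TypeError; excluded by Pre_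
  | some s =>
    let theLoop := PySem.Set.add PySem.Set.empty s
    let toTest := (fcnA rows s).foldl PySem.Set.add PySem.Set.empty
    aRun (fcnA rows) ((rows.map List.length).sum + 1) theLoop toTest

-- ===== PORT B =====
def connB : PySem.Dict Char (List Char) :=
  PySem.Dict.ofList
    [('S', ['N','S','E','W']), ('|', ['N','S']), ('F', ['S','E']), ('L', ['N','E']),
     ('J', ['N','W']), ('7', ['W','S']), ('-', ['E','W']), ('.', [])]

-- out_d in connections[rows[i][j]] (the membership test of B's neighbour generator)
def connectsB (rows : List (List Char)) (i j : Int) (d : Char) : Bool :=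
  PySem.Chars.isIn [d] (PySem.Dict.getD connB (PySem.List.pyGetD (PySem.List.pyGetD rows i []) j ' ') [])

-- neighbours(c): one loop over the direction table, yields collected in order
def fcnB (rows : List (List Char)) (c : Int × Int) : List (Int × Int) :=
  [((-1 : Int), (0 : Int), 'N', 'S'), (0, -1, 'W', 'E'), (0, 1, 'E', 'W'), (1, 0, 'S', 'N')].foldl
    (fun out d =>
      let ni := c.1 + d.1
      let nj := c.2 + d.2.1
      if decide (0 ≤ ni) && decide (ni < (rows.length : Int)) && decide (0 ≤ nj) &&
         decide (nj < ((PySem.List.pyGetD rows ni []).length : Int)) &&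
         connectsB rows c.1 c.2 d.2.2.1 && connectsB rows ni nj d.2.2.2
      then out ++ [(ni, nj)] else out) []

-- j = row.find("S"); if j >= 0: s_coords = (i, j); break
def findSB (rs : List (List Char)) (i : Int) : Option (Int × Int) :=
  match rs with
  | [] => none
  | r :: t =>
    let j := PySem.Chars.find r ['S']
    if 0 ≤ j then some (i, j) else findSB t (i + 1)

-- while True: bigger = loop | {z for x in loop for z in neighbours(x)}; if bigger == loop: return
-- loop; loop = bigger.  The comprehension iterates the set 'loop' in insertion order (Python's
-- hash order is unobservable in the returned set); fuel is a totalization guard only for the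
-- 'while True', proved never to run out under Pre_.
def cRun (nbrs : (Int × Int) → List (Int × Int)) :
    Nat → List (Int × Int) → List (Int × Int)
  | 0, loop => loop
  | f + 1, loop =>
    let bigger := PySem.Set.union loop (PySem.Set.ofList (loop.flatMap nbrs))
    if PySem.Set.equal bigger loop then loop else cRun nbrs f bigger

def extract_loop_alt (raw_input : String) : List (Int × Int) :=
  let rows := PySem.Chars.split₀ (PySem.Chars.strip raw_input.toList)
  match findSB rows 0 with
  | none => []   -- Python: s_coords stays unbound, `{s_coords}` raises NameError; excluded by Pre_
  | some s =>
    cRun (fcnB rows) ((rows.map List.length).sum + 1) (PySem.Set.add PySem.Set.empty s)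

-- ===== PRECONDITION & SPEC =====
def pipeChars : List Char := ['S','|','F','L','J','7','-','.']

def pvDirs (c : Char) : List Char :=
  if c = 'S' then ['N','S','E','W'] else if c = '|' then ['N','S'] else if c = 'F' then ['S','E']
  else if c = 'L' then ['N','E'] else if c = 'J' then ['N','W'] else if c = '7' then ['W','S']
  else if c = '-' then ['E','W'] else []

def pvAt (rows : List (List Char)) (i j : Int) : Char :=
  PySem.List.pyGetD (PySem.List.pyGetD rows i []) j ' '

-- every index A would probe from cell c is in bounds and holds a pipe character
def pvProbeOK (rows : List (List Char)) (c : Int × Int) : Bool :=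
  (pvDirs (pvAt rows c.1 c.2)).all (fun d =>
    if d = 'N' then !(decide (0 < c.1)) ||
      (decide (c.2 < ((PySem.List.pyGetD rows (c.1-1) []).length : Int)) &&
       decide (pvAt rows (c.1-1) c.2 ∈ pipeChars))
    else if d = 'W' then !(decide (0 < c.2)) || decide (pvAt rows c.1 (c.2-1) ∈ pipeChars)
    else if d = 'E' then !(decide (c.2 < ((PySem.List.pyGetD rows c.1 []).length : Int) - 1)) ||
      decide (pvAt rows c.1 (c.2+1) ∈ pipeChars)
    else !(decide (c.1 < (rows.length : Int) - 1)) ||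
      (decide (c.2 < ((PySem.List.pyGetD rows (c.1+1) []).length : Int)) &&
       decide (pvAt rows (c.1+1) c.2 ∈ pipeChars)))

-- the cells linked to c by mutually-pointing pipes (the edges of the pipe graph)
def pvLinks (rows : List (List Char)) (c : Int × Int) : List (Int × Int) :=
  (pvDirs (pvAt rows c.1 c.2)).flatMap (fun d =>
    if d = 'N' then
      (if decide (0 < c.1) && decide ('S' ∈ pvDirs (pvAt rows (c.1-1) c.2)) then [(c.1-1, c.2)] else [])
    else if d = 'W' then
      (if decide (0 < c.2) && decide ('E' ∈ pvDirs (pvAt rows c.1 (c.2-1))) then [(c.1, c.2-1)] else [])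
    else if d = 'E' then
      (if decide (c.2 < ((PySem.List.pyGetD rows c.1 []).length : Int) - 1) &&
          decide ('W' ∈ pvDirs (pvAt rows c.1 (c.2+1))) then [(c.1, c.2+1)] else [])
    else
      (if decide (c.1 < (rows.length : Int) - 1) &&
          decide ('N' ∈ pvDirs (pvAt rows (c.1+1) c.2)) then [(c.1+1, c.2)] else []))

-- the pipe-connected component of c0: closing the edge relation over the grid's cells
def pvComponent (rows : List (List Char)) (c0 : Int × Int) : List (Int × Int) :=
  (fun s => PySem.Set.update s (s.flatMap (pvLinks rows)))^[(rows.map List.length).sum] [c0]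

-- Pre_ admits exactly the inputs on which A returns: the grid contains an 'S' and the pipe
-- component of the first S probes only in-bounds pipe characters; outside it A raises
-- (TypeError with no 'S'; KeyError/IndexError when the flood fill probes a non-pipe
-- character or past the end of a shorter row).
def Pre_extract_loop (raw_input : String) : Prop :=
  let rows := PySem.Chars.split₀ (PySem.Chars.strip raw_input.toList)
  let ri := rows.findIdx (fun r => r.contains 'S')
  (rows.any (fun r => r.contains 'S') &&
   (pvComponent rows ((ri : Int), ((rows.getD ri []).idxOf 'S' : Int))).all (pvProbeOK rows)) = true
instance (raw_input : String) : Decidable (Pre_extract_loop raw_input) := by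
  unfold Pre_extract_loop; infer_instance

def pvWitness_extract_loop : String := "S7\nLJ"

def Spec_extract_loop (raw_input : String) (out : List (Int × Int)) : Prop :=
  out = extract_loop_alt raw_input
instance (raw_input : String) (out : List (Int × Int)) : Decidable (Spec_extract_loop raw_input out) := by
  unfold Spec_extract_loop; infer_instance

-- ===== CLAIM (what is proved, stated in full; the proofs are below) =====
def Claim_equal_extract_loop : Prop := ∀ (raw_input : String), Dom_extract_loop raw_input →
  Pre_extract_loop raw_input → Spec_extract_loop raw_input (extract_loop raw_input)

-- ===== LEMMAS AND PROOFS =====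

-- proof-only: the level-synchronous BFS that both runs are reduced to
def innerAdd (theLoop acc ns : List (Int × Int)) : List (Int × Int) :=
  ns.foldl (fun a z => if z ∈ theLoop then a else if z ∈ a then a else a ++ [z]) acc

def levelAux (nbrs : (Int × Int) → List (Int × Int)) (theLoop acc front : List (Int × Int)) :
    List (Int × Int) :=
  front.foldl (fun a x => innerAdd theLoop a (nbrs x)) acc

def bRun (nbrs : (Int × Int) → List (Int × Int)) :
    Nat → List (Int × Int) → List (Int × Int) → List (Int × Int)
  | 0, theLoop, _ => theLoop
  | f + 1, theLoop, frontier =>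
    if frontier.isEmpty then theLoop
    else
      let nxt := levelAux nbrs theLoop [] frontier
      bRun nbrs f (theLoop ++ nxt) nxt

theorem addNbrs_nil (L t : List (Int × Int)) : addNbrs L t [] = t := rfl
theorem addNbrs_cons (L t : List (Int × Int)) (z : Int × Int) (ns : List (Int × Int)) :
    addNbrs L t (z :: ns) = addNbrs L (if z ∈ L then t else PySem.Set.add t z) ns := rfl
theorem innerAdd_nil (L acc : List (Int × Int)) : innerAdd L acc [] = acc := rfl
theorem innerAdd_cons (L acc : List (Int × Int)) (z : Int × Int) (ns : List (Int × Int)) :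
    innerAdd L acc (z :: ns) =
      innerAdd L (if z ∈ L then acc else if z ∈ acc then acc else acc ++ [z]) ns := rfl
theorem levelAux_nil (nbrs : (Int × Int) → List (Int × Int)) (L acc : List (Int × Int)) :
    levelAux nbrs L acc [] = acc := rfl
theorem levelAux_cons (nbrs : (Int × Int) → List (Int × Int)) (L acc : List (Int × Int))
    (x : Int × Int) (fr : List (Int × Int)) :
    levelAux nbrs L acc (x :: fr) = levelAux nbrs L (innerAdd L acc (nbrs x)) fr := rfl

-- the universe of real grid cells (i, j) with j inside row i
def mkV (rows : List (List Char)) : List (Int × Int) :=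
  (PySem.List.enumerate rows 0).flatMap
    (fun p => (List.range p.2.length).map (fun (b : Nat) => (p.1, (b : Int))))

theorem mem_mkV (rows : List (List Char)) (p : Int × Int) :
    p ∈ mkV rows ↔ ∃ k : Nat, k < rows.length ∧ p.1 = (k : Int) ∧ 0 ≤ p.2 ∧
      p.2 < ((PySem.List.pyGetD rows (k : Int) []).length : Int) := by
  obtain ⟨x, y⟩ := p
  unfold mkV
  constructor
  · intro h
    obtain ⟨q, hq, hmem⟩ := List.mem_flatMap.mp h
    obtain ⟨k, hk, rfl⟩ := (PySem.List.mem_enumerate_iff rows 0 q).mp hq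
    obtain ⟨b, hb, hpb⟩ := List.mem_map.mp hmem
    rw [List.mem_range] at hb
    obtain ⟨h1, rfl⟩ : (0 + (k : Int)) = x ∧ (b : Int) = y := by simpa [Prod.ext_iff] using hpb
    have he : PySem.List.pyGetD rows ((k : Int)) [] = rows[k] := by
      rw [PySem.List.pyGetD_eq_getElem rows [] (by omega) (by exact_mod_cast hk)]
      simp
    dsimp only at hb ⊢
    refine ⟨k, hk, by omega, by omega, ?_⟩
    rw [he]
    exact_mod_cast hb
  · rintro ⟨k, hk, h1, h3, h4⟩
    dsimp only at h1 h3 h4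
    have he : PySem.List.pyGetD rows ((k : Int)) [] = rows[k] := by
      rw [PySem.List.pyGetD_eq_getElem rows [] (by omega) (by exact_mod_cast hk)]
      simp
    rw [he] at h4
    refine List.mem_flatMap.mpr ⟨((0 : Int) + (k : Int), rows[k]), ?_, ?_⟩
    · exact (PySem.List.mem_enumerate_iff rows 0 _).mpr ⟨k, hk, rfl⟩
    · refine List.mem_map.mpr ⟨y.toNat, List.mem_range.mpr (by dsimp only; omega), ?_⟩
      simp only [Prod.ext_iff]
      constructor <;> dsimp only <;> omega

theorem length_mkV (rows : List (List Char)) : (mkV rows).length = (rows.map List.length).sum := by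
  unfold mkV
  rw [List.length_flatMap]
  have h1 : ((PySem.List.enumerate rows 0).map
      (fun p => ((List.range p.2.length).map (fun (b : Nat) => (p.1, (b : Int)))).length))
      = (PySem.List.enumerate rows 0).map (fun p => p.2.length) := by
    apply List.map_congr_left
    intro p _
    simp
  rw [h1, show (fun p : Int × List Char => p.2.length) = (List.length ∘ (fun p : Int × List Char => p.2)) from rfl,
    ← List.map_map, PySem.List.map_snd_enumerate]

theorem set_add_eq (s : List (Int × Int)) (x : Int × Int) :
    PySem.Set.add s x = if x ∈ s then s else s ++ [x] := by
  by_cases h : x ∈ s <;> simp [PySem.Set.add, h]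

theorem foldl_add_of_nodup (l acc : List (Int × Int)) (h : (acc ++ l).Nodup) :
    l.foldl PySem.Set.add acc = acc ++ l := by
  induction l generalizing acc with
  | nil => simp
  | cons x t ih =>
    have hx : x ∉ acc := by
      intro hx
      exact (List.nodup_append.mp h).2.2 x hx x (by simp) rfl
    rw [List.foldl_cons, set_add_eq, if_neg hx, ih (acc ++ [x]) (by
      rw [List.append_cons] at h
      exact h)]
    simp

theorem innerAdd_eq (ns : List (Int × Int)) (rest acc L S : List (Int × Int))
    (H : ∀ z, z ∈ S ↔ z ∈ L ∨ z ∈ rest) :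
    addNbrs L (rest ++ acc) ns = rest ++ innerAdd S acc ns := by
  induction ns generalizing acc with
  | nil => simp [addNbrs_nil, innerAdd_nil]
  | cons z t ih =>
    rw [addNbrs_cons, innerAdd_cons]
    by_cases hzL : z ∈ L
    · rw [if_pos hzL, if_pos ((H z).mpr (Or.inl hzL))]
      exact ih acc
    · rw [if_neg hzL, set_add_eq]
      by_cases hzr : z ∈ rest
      · rw [if_pos (by simp [hzr] : z ∈ rest ++ acc), if_pos ((H z).mpr (Or.inr hzr))]
        exact ih acc
      · have hzS : z ∉ S := by
          intro hz
          rcases (H z).mp hz with h | h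
          exacts [hzL h, hzr h]
        rw [if_neg hzS]
        by_cases hza : z ∈ acc
        · rw [if_pos (by simp [hza] : z ∈ rest ++ acc), if_pos hza]
          exact ih acc
        · rw [if_neg (by simp [hzr, hza] : ¬ z ∈ rest ++ acc), if_neg hza, List.append_assoc]
          exact ih (acc ++ [z])

theorem innerAdd_subset (ns acc S : List (Int × Int)) (z : Int × Int)
    (h : z ∈ innerAdd S acc ns) : z ∈ acc ∨ z ∈ ns := by
  induction ns generalizing acc with
  | nil =>
    rw [innerAdd_nil] at h
    exact Or.inl h
  | cons w t ih =>
    rw [innerAdd_cons] at h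
    rcases ih _ h with h' | h'
    · split_ifs at h' with h1 h2
      · exact Or.inl h'
      · exact Or.inl h'
      · rcases List.mem_append.mp h' with h'' | h''
        · exact Or.inl h''
        · simp only [List.mem_singleton] at h''
          subst h''
          exact Or.inr (by simp)
    · exact Or.inr (List.mem_cons_of_mem _ h')

theorem innerAdd_nodup (ns acc S : List (Int × Int)) (h : (S ++ acc).Nodup) :
    (S ++ innerAdd S acc ns).Nodup := by
  induction ns generalizing acc with
  | nil => exact h
  | cons w t ih =>
    rw [innerAdd_cons]
    apply ih
    split_ifs with h1 h2
    · exact h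
    · exact h
    · rw [← List.append_assoc]
      refine List.Nodup.append h (List.nodup_singleton w) ?_
      intro a ha haw
      simp only [List.mem_singleton] at haw
      subst haw
      rcases List.mem_append.mp ha with h' | h'
      exacts [h1 h', h2 h']

theorem innerAdd_of_disjoint (ns acc S : List (Int × Int)) (h : ∀ z ∈ ns, z ∉ S) :
    innerAdd S acc ns = ns.foldl PySem.Set.add acc := by
  induction ns generalizing acc with
  | nil => simp [innerAdd_nil]
  | cons w t ih =>
    rw [innerAdd_cons, if_neg (h w (by simp)), List.foldl_cons, set_add_eq]
    exact ih _ (fun z hz => h z (by simp [hz]))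

theorem levelAux_subset (nbrs : (Int × Int) → List (Int × Int)) (front acc S : List (Int × Int))
    (z : Int × Int) (h : z ∈ levelAux nbrs S acc front) : z ∈ acc ∨ ∃ x ∈ front, z ∈ nbrs x := by
  induction front generalizing acc with
  | nil =>
    rw [levelAux_nil] at h
    exact Or.inl h
  | cons x t ih =>
    rw [levelAux_cons] at h
    rcases ih _ h with h' | h'
    · rcases innerAdd_subset _ _ _ _ h' with h'' | h''
      · exact Or.inl h''
      · exact Or.inr ⟨x, by simp, h''⟩
    · obtain ⟨y, hy, hz'⟩ := h'
      exact Or.inr ⟨y, by simp [hy], hz'⟩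

theorem levelAux_nodup (nbrs : (Int × Int) → List (Int × Int)) (front acc S : List (Int × Int))
    (h : (S ++ acc).Nodup) : (S ++ levelAux nbrs S acc front).Nodup := by
  induction front generalizing acc with
  | nil => exact h
  | cons x t ih =>
    rw [levelAux_cons]
    exact ih _ (innerAdd_nodup _ _ _ h)

theorem aRun_level (nA nB : (Int × Int) → List (Int × Int)) (front : List (Int × Int)) :
    ∀ (g : Nat) (theLoop acc : List (Int × Int)), (theLoop ++ front).Nodup →
    (∀ x ∈ front, nA x = nB x) →
    aRun nA (front.length + g) theLoop (front ++ acc) =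
      aRun nA g (theLoop ++ front) (levelAux nB (theLoop ++ front) acc front) := by
  induction front with
  | nil =>
    intro g L acc _ _
    simp [levelAux_nil]
  | cons x t ih =>
    intro g L acc hnd hpt
    have hxL : x ∉ L := by
      intro hx
      exact (List.nodup_append.mp hnd).2.2 x hx x (by simp) rfl
    have hfuel : (x :: t).length + g = (t.length + g) + 1 := by
      simp only [List.length_cons]
      omega
    rw [hfuel]
    have hstep : aRun nA ((t.length + g) + 1) L ((x :: t) ++ acc) =
        aRun nA (t.length + g) (PySem.Set.add L x)
          (addNbrs (PySem.Set.add L x) (t ++ acc) (nA x)) := rfl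
    rw [hstep, set_add_eq, if_neg hxL]
    rw [innerAdd_eq (nA x) t acc (L ++ [x]) (L ++ x :: t)
      (by intro z; simp; tauto)]
    rw [hpt x (by simp)]
    have hnd' : ((L ++ [x]) ++ t).Nodup := by
      rw [List.append_cons] at hnd
      exact hnd
    rw [ih g (L ++ [x]) (innerAdd (L ++ x :: t) acc (nB x)) hnd'
      (fun y hy => hpt y (by simp [hy]))]
    rw [levelAux_cons, ← List.append_cons]

theorem nodup_length_le (l U : List (Int × Int)) (hn : l.Nodup) (hs : ∀ x ∈ l, x ∈ U) :
    l.length ≤ U.length := by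
  have h1 : l.toFinset.card = l.length := List.toFinset_card_of_nodup hn
  have h2 : l.toFinset ⊆ U.toFinset := by
    intro x hx
    simp only [List.mem_toFinset] at *
    exact hs x hx
  calc l.length = l.toFinset.card := h1.symm
    _ ≤ U.toFinset.card := Finset.card_le_card h2
    _ ≤ U.length := List.toFinset_card_le U

theorem main_run (nA nB : (Int × Int) → List (Int × Int)) (U : List (Int × Int))
    (hpt : ∀ x ∈ U, nA x = nB x) (hcl : ∀ x ∈ U, ∀ z ∈ nA x, z ∈ U) :
    ∀ (fB fA : Nat) (theLoop front : List (Int × Int)),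
    (theLoop ++ front).Nodup → (∀ x ∈ theLoop ++ front, x ∈ U) →
    U.length + 1 ≤ fA + theLoop.length → U.length + 1 ≤ fB + theLoop.length →
    aRun nA fA theLoop front = bRun nB fB (theLoop ++ front) front := by
  intro fB
  induction fB with
  | zero =>
    intro fA L front hnd hsub hA hB
    exfalso
    have hle := nodup_length_le (L ++ front) U hnd hsub
    simp only [List.length_append] at hle
    omega
  | succ fB ih =>
    intro fA L front hnd hsub hA hB
    have hle : L.length + front.length ≤ U.length := by
      have := nodup_length_le (L ++ front) U hnd hsub
      simpa using this
    cases front with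
    | nil =>
      obtain ⟨f', rfl⟩ : ∃ f', fA = f' + 1 := ⟨fA - 1, by omega⟩
      show L = bRun nB (fB + 1) (L ++ []) []
      simp [bRun]
    | cons x t =>
      have hfl : (x :: t).length + 1 ≤ fA := by
        simp only [List.length_cons] at hle ⊢
        omega
      obtain ⟨g, hg⟩ : ∃ g, fA = (x :: t).length + g := ⟨fA - (x :: t).length, by omega⟩
      have hlev := aRun_level nA nB (x :: t) g L [] hnd
        (fun y hy => hpt y (hsub y (by simp [hy])))
      rw [List.append_nil] at hlev
      rw [hg, hlev]
      have hrhs : bRun nB (fB + 1) (L ++ x :: t) (x :: t) =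
          bRun nB fB ((L ++ x :: t) ++ levelAux nB (L ++ x :: t) [] (x :: t))
            (levelAux nB (L ++ x :: t) [] (x :: t)) := rfl
      rw [hrhs]
      have hnd2 : ((L ++ x :: t) ++ levelAux nB (L ++ x :: t) [] (x :: t)).Nodup :=
        levelAux_nodup nB (x :: t) [] (L ++ x :: t) (by simpa using hnd)
      apply ih g (L ++ x :: t) (levelAux nB (L ++ x :: t) [] (x :: t)) hnd2
      · intro y hy
        rcases List.mem_append.mp hy with h | h
        · exact hsub y h
        · rcases levelAux_subset nB (x :: t) [] (L ++ x :: t) y h with h' | h'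
          · simp at h'
          · obtain ⟨w, hw, hz⟩ := h'
            have hwU : w ∈ U := hsub w (List.mem_append.mpr (Or.inr hw))
            rw [← hpt w hwU] at hz
            exact hcl w hwU y hz
      · simp only [List.length_append, List.length_cons] at hA hg ⊢
        omega
      · simp only [List.length_append, List.length_cons] at hB ⊢
        omega

theorem findS_eq (rs : List (List Char)) : ∀ (i : Int), findSA rs i = findSB rs i := by
  induction rs with
  | nil => intro i; rfl
  | cons r t ih =>
    intro i
    by_cases hc : PySem.Chars.isIn ['S'] r = true
    · have hf : 0 ≤ PySem.Chars.find r ['S'] :=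
        (PySem.Chars.find_nonneg_iff _ _).mpr ((PySem.Chars.isIn_iff_infix _ _).mp hc)
      simp [findSA, findSB, hc, hf]
    · have hf : ¬ 0 ≤ PySem.Chars.find r ['S'] := by
        intro hq
        exact hc ((PySem.Chars.isIn_iff_infix _ _).mpr ((PySem.Chars.find_nonneg_iff _ _).mp hq))
      simp [findSA, findSB, hc, hf]
      exact ih (i + 1)

theorem findSA_spec (rs : List (List Char)) : ∀ (k : Int) (s : Int × Int),
    findSA rs k = some s →
    ∃ n : Nat, ∃ h : n < rs.length, s.1 = k + n ∧ 0 ≤ s.2 ∧ s.2 < (rs[n].length : Int) := by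
  induction rs with
  | nil => intro k s h; simp [findSA] at h
  | cons r t ih =>
    intro k s h
    by_cases hc : PySem.Chars.isIn ['S'] r = true
    · rw [findSA, if_pos hc] at h
      obtain rfl : (k, PySem.Chars.find r ['S']) = s := by simpa using h
      have h0 : 0 ≤ PySem.Chars.find r ['S'] :=
        (PySem.Chars.find_nonneg_iff _ _).mpr ((PySem.Chars.isIn_iff_infix _ _).mp hc)
      have hlt : (PySem.Chars.find r ['S']).toNat < r.length := by
        have hspec := PySem.Chars.find_spec (s := r) (sub := ['S']) h0
        have hle := hspec.1.length_le
        simp [List.length_drop] at hle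
        omega
      exact ⟨0, by simp, by simp, h0, by simp; omega⟩
    · rw [findSA, if_neg hc] at h
      obtain ⟨n, hn, h1, h2, h3⟩ := ih (k + 1) s h
      refine ⟨n + 1, by simpa using Nat.succ_lt_succ hn, ?_, h2, ?_⟩
      · rw [h1]; push_cast; ring
      · simpa using h3

theorem findSA_isSome (rs : List (List Char)) : ∀ (i : Int), (∃ r ∈ rs, 'S' ∈ r) →
    (findSA rs i).isSome := by
  induction rs with
  | nil =>
    intro i h
    obtain ⟨r, hr, _⟩ := h
    simp at hr
  | cons r t ih =>
    intro i h
    by_cases hc : PySem.Chars.isIn ['S'] r = true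
    · simp [findSA, hc]
    · rw [findSA, if_neg hc]
      apply ih
      obtain ⟨r', hr', hS⟩ := h
      rcases List.mem_cons.mp hr' with rfl | hr''
      · exfalso
        apply hc
        rw [PySem.Chars.isIn_iff_infix]
        obtain ⟨u, v, rfl⟩ := List.append_of_mem hS
        exact ⟨u, v, by simp⟩
      · exact ⟨r', hr'', hS⟩

theorem contains_empty_set (d : Char) : PySem.Set.contains PySem.Set.empty d = false := rfl

theorem isIn_single_nil (d : Char) : PySem.Chars.isIn [d] [] = false := by
  rw [PySem.Chars.isIn_eq_false_iff]
  intro h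
  have := h.length_le
  simp at this

theorem connA_keys : connA.keys = pipeChars := by decide

theorem connB_keys : connB.keys = pipeChars := by decide

theorem connA_default (ch : Char) (hc : ch ∉ pipeChars) :
    PySem.Dict.getD connA ch PySem.Set.empty = PySem.Set.empty := by
  refine PySem.Dict.getD_of_not_contains _ _ ?_
  rw [Bool.eq_false_iff]
  intro hq
  exact hc (connA_keys ▸ (PySem.Dict.contains_iff_mem_keys connA ch).mp hq)

theorem connB_default (ch : Char) (hc : ch ∉ pipeChars) :
    PySem.Dict.getD connB ch [] = [] := by
  refine PySem.Dict.getD_of_not_contains _ _ ?_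
  rw [Bool.eq_false_iff]
  intro hq
  exact hc (connB_keys ▸ (PySem.Dict.contains_iff_mem_keys connB ch).mp hq)

theorem connA_valid (ch d : Char)
    (h : PySem.Set.contains (PySem.Dict.getD connA ch PySem.Set.empty) d = true) :
    ch ∈ pipeChars := by
  by_cases hc : ch ∈ pipeChars
  · exact hc
  · rw [connA_default ch hc, contains_empty_set] at h
    cases h

theorem conn_bridge_all (ch : Char) : ∀ d ∈ (['N','S','E','W'] : List Char),
    PySem.Set.contains (PySem.Dict.getD connA ch PySem.Set.empty) d =
      PySem.Chars.isIn [d] (PySem.Dict.getD connB ch []) := by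
  intro d hd
  by_cases hc : ch ∈ pipeChars
  · fin_cases hc <;> fin_cases hd <;> rfl
  · rw [connA_default ch hc, connB_default ch hc, contains_empty_set, isIn_single_nil]

theorem cellA_default (rows : List (List Char)) (i j : Int)
    (h : ((PySem.List.pyGetD rows i []).length : Int) ≤ j) : cellA rows i j = ' ' := by
  unfold cellA
  apply PySem.List.pyGetD_of_none
  rw [PySem.List.pyGet?_eq_none_iff]
  intro hIR
  simp [PySem.Raise.InRange] at hIR
  omega

-- proof-only block views of the two neighbour functions
def ablk (rows : List (List Char)) (i j ni nj : Int) (dir opp : Char) (bnd : Bool)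
    (acc : List (Int × Int)) : List (Int × Int) :=
  if PySem.Set.contains (PySem.Dict.getD connA (cellA rows i j) PySem.Set.empty) dir && bnd then
    (if PySem.Set.contains (PySem.Dict.getD connA (cellA rows ni nj) PySem.Set.empty) opp
     then acc ++ [(ni, nj)] else acc)
  else acc

def bblk (rows : List (List Char)) (i j ni nj : Int) (dir opp : Char)
    (acc : List (Int × Int)) : List (Int × Int) :=
  if decide (0 ≤ ni) && decide (ni < (rows.length : Int)) && decide (0 ≤ nj) &&
     decide (nj < ((PySem.List.pyGetD rows ni []).length : Int)) &&
     connectsB rows i j dir && connectsB rows ni nj opp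
  then acc ++ [(ni, nj)] else acc

theorem fcnA_eq_blocks (rows : List (List Char)) (i j : Int) : fcnA rows (i, j) =
    ablk rows i j (i+1) j 'S' 'N' (decide (i < (rows.length : Int) - 1))
      (ablk rows i j i (j+1) 'E' 'W' (decide (j < ((PySem.List.pyGetD rows i []).length : Int) - 1))
        (ablk rows i j i (j-1) 'W' 'E' (decide (0 < j))
          (ablk rows i j (i-1) j 'N' 'S' (decide (0 < i)) []))) := rfl

theorem fcnB_eq_blocks (rows : List (List Char)) (i j : Int) : fcnB rows (i, j) =
    bblk rows i j (i + 1) (j + 0) 'S' 'N'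
      (bblk rows i j (i + 0) (j + 1) 'E' 'W'
        (bblk rows i j (i + 0) (j + -1) 'W' 'E'
          (bblk rows i j (i + -1) (j + 0) 'N' 'S' []))) := rfl

theorem mem_ablk (rows : List (List Char)) (i j ni nj : Int) (dir opp : Char) (bnd : Bool)
    (acc : List (Int × Int)) (z : Int × Int) (h : z ∈ ablk rows i j ni nj dir opp bnd acc) :
    z ∈ acc ∨ (bnd = true ∧
      PySem.Set.contains (PySem.Dict.getD connA (cellA rows ni nj) PySem.Set.empty) opp = true ∧
      z = (ni, nj)) := by
  unfold ablk at h
  split_ifs at h with h1 h2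
  · rcases List.mem_append.mp h with h' | h'
    · exact Or.inl h'
    · simp only [List.mem_singleton] at h'
      exact Or.inr ⟨(Bool.and_eq_true _ _ |>.mp h1).2, h2, h'⟩
  · exact Or.inl h
  · exact Or.inl h

theorem blk_eq (rows : List (List Char)) (i j ni nj : Int) (dir opp : Char) (bnd : Bool)
    (hcur : PySem.Set.contains (PySem.Dict.getD connA (cellA rows i j) PySem.Set.empty) dir =
      connectsB rows i j dir)
    (hnbr : PySem.Set.contains (PySem.Dict.getD connA (cellA rows ni nj) PySem.Set.empty) opp =
      connectsB rows ni nj opp)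
    (hb1 : (decide (0 ≤ ni) && decide (ni < (rows.length : Int)) && decide (0 ≤ nj) &&
      decide (nj < ((PySem.List.pyGetD rows ni []).length : Int))) = true → bnd = true)
    (hb2 : bnd = true → (decide (0 ≤ ni) && decide (ni < (rows.length : Int)) && decide (0 ≤ nj) &&
      decide (nj < ((PySem.List.pyGetD rows ni []).length : Int))) = true ∨
      (PySem.Set.contains (PySem.Dict.getD connA (cellA rows ni nj) PySem.Set.empty) opp = false ∧
       connectsB rows ni nj opp = false))
    (acc : List (Int × Int)) :
    ablk rows i j ni nj dir opp bnd acc = bblk rows i j ni nj dir opp acc := by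
  unfold ablk bblk
  cases hbnd : bnd
  · have hB : (decide (0 ≤ ni) && decide (ni < (rows.length : Int)) && decide (0 ≤ nj) &&
        decide (nj < ((PySem.List.pyGetD rows ni []).length : Int))) = false := by
      rcases Bool.eq_false_or_eq_true (decide (0 ≤ ni) && decide (ni < (rows.length : Int)) &&
        decide (0 ≤ nj) && decide (nj < ((PySem.List.pyGetD rows ni []).length : Int))) with h | h
      · rw [hb1 h] at hbnd
        cases hbnd
      · exact h
    rw [hB]
    simp
  · rcases hb2 hbnd with hB | ⟨h1, h2⟩
    · rw [hB, hcur, hnbr]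
      cases connectsB rows i j dir <;> cases connectsB rows ni nj opp <;> simp
    · rw [h1, h2]
      simp

theorem fcnA_nodup (rows : List (List Char)) (c : Int × Int) : (fcnA rows c).Nodup := by
  obtain ⟨i, j⟩ := c
  simp only [fcnA]
  split_ifs <;> simp [Prod.ext_iff] <;> omega

theorem self_not_mem_fcnA (rows : List (List Char)) (c : Int × Int) : c ∉ fcnA rows c := by
  obtain ⟨i, j⟩ := c
  simp only [fcnA]
  split_ifs <;> simp [Prod.ext_iff] <;> omega

theorem fcnA_subset (rows : List (List Char)) (c : Int × Int) (hc : c ∈ mkV rows) :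
    ∀ z ∈ fcnA rows c, z ∈ mkV rows := by
  obtain ⟨i, j⟩ := c
  obtain ⟨k, hk, hik, hj0, hj1⟩ := (mem_mkV rows _).mp hc
  dsimp only at hik hj0 hj1
  rw [← hik] at hj1
  have hk' : (k : Int) < rows.length := by exact_mod_cast hk
  have hi0 : 0 ≤ i := by omega
  have hi1 : i < (rows.length : Int) := by omega
  have hmem : ∀ (a b : Int), 0 ≤ a → a < (rows.length : Int) → 0 ≤ b →
      b < ((PySem.List.pyGetD rows a []).length : Int) → (a, b) ∈ mkV rows := by
    intro a b h1 h2 h3 h4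
    refine (mem_mkV rows _).mpr ⟨a.toNat, by omega, by dsimp only; omega, by dsimp only; omega, ?_⟩
    dsimp only
    rw [show ((a.toNat : Nat) : Int) = a from by omega]
    exact h4
  have hrange : ∀ (a b : Int) (d : Char), 0 ≤ b →
      PySem.Set.contains (PySem.Dict.getD connA (cellA rows a b) PySem.Set.empty) d = true →
      b < ((PySem.List.pyGetD rows a []).length : Int) := by
    intro a b d hb0 hcontains
    by_contra hge
    rw [cellA_default rows a b (by omega)] at hcontains
    exact absurd (connA_valid _ _ hcontains) (by decide)
  intro z hz
  rw [fcnA_eq_blocks] at hz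
  rcases mem_ablk _ _ _ _ _ _ _ _ _ _ hz with hz | ⟨hg, hin, rfl⟩
  · rcases mem_ablk _ _ _ _ _ _ _ _ _ _ hz with hz | ⟨hg, hin, rfl⟩
    · rcases mem_ablk _ _ _ _ _ _ _ _ _ _ hz with hz | ⟨hg, hin, rfl⟩
      · rcases mem_ablk _ _ _ _ _ _ _ _ _ _ hz with hz | ⟨hg, hin, rfl⟩
        · simp at hz
        · simp only [decide_eq_true_eq] at hg
          exact hmem _ _ (by omega) (by omega) hj0 (hrange _ _ _ hj0 hin)
      · simp only [decide_eq_true_eq] at hg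
        exact hmem _ _ (by omega) (by omega) (by omega) (by omega)
    · simp only [decide_eq_true_eq] at hg
      exact hmem _ _ (by omega) (by omega) (by omega) (by omega)
  · simp only [decide_eq_true_eq] at hg
    exact hmem _ _ (by omega) (by omega) hj0 (hrange _ _ _ hj0 hin)

theorem fcn_eq (rows : List (List Char)) (c : Int × Int) (hc : c ∈ mkV rows) :
    fcnA rows c = fcnB rows c := by
  obtain ⟨i, j⟩ := c
  obtain ⟨k, hk, hik, hj0, hj1⟩ := (mem_mkV rows _).mp hc
  dsimp only at hik hj0 hj1
  rw [← hik] at hj1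
  have hk' : (k : Int) < rows.length := by exact_mod_cast hk
  have hi0 : 0 ≤ i := by omega
  have hi1 : i < (rows.length : Int) := by omega
  have hdef : ∀ (a b : Int) (d : Char), 0 ≤ b →
      ((PySem.List.pyGetD rows a []).length : Int) ≤ b →
      PySem.Set.contains (PySem.Dict.getD connA (cellA rows a b) PySem.Set.empty) d = false ∧
      connectsB rows a b d = false := by
    intro a b d h1 h2
    have hsp : cellA rows a b = ' ' := cellA_default rows a b h2
    constructor
    · rw [hsp, show PySem.Dict.getD connA ' ' PySem.Set.empty = PySem.Set.empty from by decide,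
        contains_empty_set]
    · unfold connectsB
      rw [show PySem.List.pyGetD (PySem.List.pyGetD rows a []) b ' ' = ' ' from hsp,
        show PySem.Dict.getD connB ' ' [] = [] from by decide, isIn_single_nil]
  rw [fcnA_eq_blocks, fcnB_eq_blocks,
      show i + -1 = i - 1 from by ring, show j + -1 = j - 1 from by ring,
      show i + 0 = i from by ring, show j + 0 = j from by ring]
  rw [blk_eq rows i j (i-1) j 'N' 'S' (decide (0 < i))
      (conn_bridge_all _ 'N' (by simp)) (conn_bridge_all _ 'S' (by simp)) ?b1N ?b2N]
  rw [blk_eq rows i j i (j-1) 'W' 'E' (decide (0 < j))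
      (conn_bridge_all _ 'W' (by simp)) (conn_bridge_all _ 'E' (by simp)) ?b1W ?b2W]
  rw [blk_eq rows i j i (j+1) 'E' 'W'
      (decide (j < ((PySem.List.pyGetD rows i []).length : Int) - 1))
      (conn_bridge_all _ 'E' (by simp)) (conn_bridge_all _ 'W' (by simp)) ?b1E ?b2E]
  rw [blk_eq rows i j (i+1) j 'S' 'N' (decide (i < (rows.length : Int) - 1))
      (conn_bridge_all _ 'S' (by simp)) (conn_bridge_all _ 'N' (by simp)) ?b1S ?b2S]
  case b1N =>
    intro h
    simp only [Bool.and_eq_true, decide_eq_true_eq] at h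
    simp only [decide_eq_true_eq]
    omega
  case b2N =>
    intro h
    simp only [decide_eq_true_eq] at h
    by_cases hj : j < ((PySem.List.pyGetD rows (i-1) []).length : Int)
    · left
      simp only [Bool.and_eq_true, decide_eq_true_eq]
      exact ⟨⟨⟨by omega, by omega⟩, by omega⟩, hj⟩
    · right
      exact hdef (i-1) j 'S' hj0 (by omega)
  case b1W =>
    intro h
    simp only [Bool.and_eq_true, decide_eq_true_eq] at h
    simp only [decide_eq_true_eq]
    omega
  case b2W =>
    intro h
    simp only [decide_eq_true_eq] at h
    left
    simp only [Bool.and_eq_true, decide_eq_true_eq]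
    exact ⟨⟨⟨by omega, by omega⟩, by omega⟩, by omega⟩
  case b1E =>
    intro h
    simp only [Bool.and_eq_true, decide_eq_true_eq] at h
    simp only [decide_eq_true_eq]
    omega
  case b2E =>
    intro h
    simp only [decide_eq_true_eq] at h
    left
    simp only [Bool.and_eq_true, decide_eq_true_eq]
    exact ⟨⟨⟨by omega, by omega⟩, by omega⟩, by omega⟩
  case b1S =>
    intro h
    simp only [Bool.and_eq_true, decide_eq_true_eq] at h
    simp only [decide_eq_true_eq]
    omega
  case b2S =>
    intro h
    simp only [decide_eq_true_eq] at h
    by_cases hj : j < ((PySem.List.pyGetD rows (i+1) []).length : Int)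
    · left
      simp only [Bool.and_eq_true, decide_eq_true_eq]
      exact ⟨⟨⟨by omega, by omega⟩, by omega⟩, hj⟩
    · right
      exact hdef (i+1) j 'N' hj0 (by omega)

-- ===== the fixed-point run equals the level-synchronous BFS =====

theorem innerAdd_mono (ns acc L : List (Int × Int)) (z : Int × Int) (h : z ∈ acc) :
    z ∈ innerAdd L acc ns := by
  induction ns generalizing acc with
  | nil => simpa [innerAdd_nil] using h
  | cons w t ih =>
    rw [innerAdd_cons]
    apply ih
    split_ifs <;> simp [h]

theorem innerAdd_complete (ns : List (Int × Int)) :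
    ∀ (acc L : List (Int × Int)) (z : Int × Int), z ∈ ns → z ∈ L ∨ z ∈ innerAdd L acc ns := by
  induction ns with
  | nil => intro acc L z h; simp at h
  | cons w t ih =>
    intro acc L z h
    rw [innerAdd_cons]
    rcases List.mem_cons.mp h with rfl | h'
    · by_cases hzL : z ∈ L
      · exact Or.inl hzL
      · right
        rw [if_neg hzL]
        by_cases hza : z ∈ acc
        · rw [if_pos hza]
          exact innerAdd_mono _ _ _ _ hza
        · rw [if_neg hza]
          exact innerAdd_mono _ _ _ _ (by simp)
    · exact ih _ _ _ h'

theorem levelAux_mono (front : List (Int × Int)) (nbrs : (Int × Int) → List (Int × Int)) :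
    ∀ (acc L : List (Int × Int)) (z : Int × Int), z ∈ acc → z ∈ levelAux nbrs L acc front := by
  induction front with
  | nil => intro acc L z h; simpa [levelAux_nil] using h
  | cons x t ih =>
    intro acc L z h
    rw [levelAux_cons]
    exact ih _ _ _ (innerAdd_mono _ _ _ _ h)

theorem levelAux_complete (front : List (Int × Int)) (nbrs : (Int × Int) → List (Int × Int)) :
    ∀ (acc L : List (Int × Int)) (z x : Int × Int), x ∈ front → z ∈ nbrs x →
    z ∈ L ∨ z ∈ levelAux nbrs L acc front := by
  induction front with
  | nil => intro acc L z x hx _; simp at hx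
  | cons w t ih =>
    intro acc L z x hx hz
    rw [levelAux_cons]
    rcases List.mem_cons.mp hx with rfl | hx'
    · rcases innerAdd_complete (nbrs x) acc L z hz with h | h
      · exact Or.inl h
      · exact Or.inr (levelAux_mono _ _ _ _ _ h)
    · exact ih _ _ _ _ hx' hz

-- foldl Set.add over a list with the seen-set L ++ acc equals innerAdd
theorem foldl_add_innerAdd (ns : List (Int × Int)) : ∀ (L acc : List (Int × Int)),
    ns.foldl PySem.Set.add (L ++ acc) = L ++ innerAdd L acc ns := by
  induction ns with
  | nil => intro L acc; simp [innerAdd_nil]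
  | cons z t ih =>
    intro L acc
    rw [List.foldl_cons, innerAdd_cons, set_add_eq]
    by_cases hzL : z ∈ L
    · rw [if_pos (by simp [hzL]), if_pos hzL]
      exact ih L acc
    · rw [if_neg hzL]
      by_cases hza : z ∈ acc
      · rw [if_pos (by simp [hza]), if_pos hza]
        exact ih L acc
      · rw [if_neg (by simp [hzL, hza]), if_neg hza, List.append_assoc]
        exact ih L (acc ++ [z])

theorem foldl_add_flatMap_level (nbrs : (Int × Int) → List (Int × Int))
    (front : List (Int × Int)) : ∀ (L acc : List (Int × Int)),
    (front.flatMap nbrs).foldl PySem.Set.add (L ++ acc) = L ++ levelAux nbrs L acc front := by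
  induction front with
  | nil => intro L acc; simp [levelAux_nil]
  | cons x t ih =>
    intro L acc
    rw [List.flatMap_cons, List.foldl_append, foldl_add_innerAdd, levelAux_cons, ih]

-- skipping the closed prefix: adding neighbours of P changes nothing
theorem foldl_add_closed (P : List (Int × Int)) (nbrs : (Int × Int) → List (Int × Int)) :
    ∀ (L : List (Int × Int)), (∀ x ∈ P, ∀ z ∈ nbrs x, z ∈ L) →
    (P.flatMap nbrs).foldl PySem.Set.add L = L := by
  induction P with
  | nil => intro L _; rfl
  | cons x t ih =>
    intro L hcl
    rw [List.flatMap_cons, List.foldl_append]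
    have h1 : (nbrs x).foldl PySem.Set.add L = L := by
      have haux : ∀ ns : List (Int × Int), (∀ z ∈ ns, z ∈ L) → ns.foldl PySem.Set.add L = L := by
        intro ns
        induction ns with
        | nil => intro _; rfl
        | cons w u ihw =>
          intro hw
          rw [List.foldl_cons, set_add_eq, if_pos (hw w (by simp))]
          exact ihw (fun z hz => hw z (by simp [hz]))
      exact haux _ (hcl x (by simp))
    rw [h1]
    exact ih L (fun y hy z hz => hcl y (by simp [hy]) z hz)

-- deduplicating the union's second argument first changes nothing
theorem update_ofList (l : List (Int × Int)) : ∀ (s : List (Int × Int)),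
    PySem.Set.update s (PySem.Set.ofList l) = PySem.Set.update s l := by
  induction l using List.reverseRecOn with
  | nil => intro s; rfl
  | append_singleton t x ih =>
    intro s
    rw [PySem.Set.ofList_append_singleton, PySem.Set.update_append,
      show PySem.Set.update (PySem.Set.update s t) [x] = PySem.Set.add (PySem.Set.update s t) x from rfl]
    by_cases hx : x ∈ PySem.Set.ofList t
    · rw [PySem.Set.add_of_mem hx, ih s, PySem.Set.add_of_mem
        ((PySem.Set.mem_update s t x).mpr (Or.inr ((PySem.Set.mem_ofList t x).mp hx)))]
    · rw [show PySem.Set.update s ((PySem.Set.ofList t).add x) =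
          PySem.Set.add (PySem.Set.update s (PySem.Set.ofList t)) x from by
        rw [set_add_eq, if_neg hx]
        rw [PySem.Set.update_append]
        rfl]
      rw [ih s]

-- the one-round fixed-point step equals appending the next BFS level
theorem union_step (nbrs : (Int × Int) → List (Int × Int)) (P F : List (Int × Int))
    (hcl : ∀ x ∈ P, ∀ z ∈ nbrs x, z ∈ P ++ F) :
    PySem.Set.union (P ++ F) (PySem.Set.ofList ((P ++ F).flatMap nbrs)) =
      (P ++ F) ++ levelAux nbrs (P ++ F) [] F := by
  rw [show PySem.Set.union (P ++ F) (PySem.Set.ofList ((P ++ F).flatMap nbrs)) =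
      PySem.Set.update (P ++ F) (PySem.Set.ofList ((P ++ F).flatMap nbrs)) from rfl,
    update_ofList,
    show PySem.Set.update (P ++ F) ((P ++ F).flatMap nbrs) =
      ((P ++ F).flatMap nbrs).foldl PySem.Set.add (P ++ F) from rfl,
    List.flatMap_append, List.foldl_append, foldl_add_closed P nbrs (P ++ F) hcl]
  have h := foldl_add_flatMap_level nbrs F (P ++ F) []
  simpa using h

theorem equal_self (L : List (Int × Int)) : PySem.Set.equal L L = true :=
  (PySem.Set.equal_iff L L).mpr (fun _ => Iff.rfl)

theorem equal_append_false (L : List (Int × Int)) (z : Int × Int) (t : List (Int × Int))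
    (h : (L ++ z :: t).Nodup) : PySem.Set.equal (L ++ z :: t) L = false := by
  have hz : z ∉ L := by
    intro hzL
    exact (List.nodup_append.mp h).2.2 z hzL z (by simp) rfl
  rw [Bool.eq_false_iff]
  intro hq
  exact hz (((PySem.Set.equal_iff _ _).mp hq z).mp (by simp))

theorem cRun_eq_bRun (nbrs : (Int × Int) → List (Int × Int)) :
    ∀ (f : Nat) (P F : List (Int × Int)), (P ++ F).Nodup →
    (∀ x ∈ P, ∀ z ∈ nbrs x, z ∈ P ++ F) →
    cRun nbrs f (P ++ F) = bRun nbrs f (P ++ F) F := by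
  intro f
  induction f with
  | zero => intro P F _ _; rfl
  | succ f ih =>
    intro P F hnd hcl
    rw [show cRun nbrs (f+1) (P ++ F) =
        (if PySem.Set.equal (PySem.Set.union (P ++ F) (PySem.Set.ofList ((P ++ F).flatMap nbrs))) (P ++ F)
         then (P ++ F)
         else cRun nbrs f (PySem.Set.union (P ++ F) (PySem.Set.ofList ((P ++ F).flatMap nbrs)))) from rfl]
    simp only [union_step nbrs P F hcl]
    have hndn : ((P ++ F) ++ levelAux nbrs (P ++ F) [] F).Nodup :=
      levelAux_nodup nbrs F [] (P ++ F) (by simpa using hnd)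
    cases hn : levelAux nbrs (P ++ F) [] F with
    | nil =>
      rw [List.append_nil, if_pos (equal_self (P ++ F))]
      cases F with
      | nil =>
        cases f <;> simp [bRun]
      | cons x xt =>
        rw [show bRun nbrs (f+1) (P ++ x :: xt) (x :: xt) =
            bRun nbrs f ((P ++ x :: xt) ++ levelAux nbrs (P ++ x :: xt) [] (x :: xt))
              (levelAux nbrs (P ++ x :: xt) [] (x :: xt)) from rfl, hn, List.append_nil]
        cases f <;> simp [bRun]
    | cons z t' =>
      rw [hn] at hndn
      rw [if_neg (by rw [equal_append_false (P ++ F) z t' hndn]; exact Bool.false_ne_true)]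
      cases F with
      | nil =>
        exfalso
        rw [levelAux_nil] at hn
        cases hn
      | cons x xt =>
        rw [show bRun nbrs (f+1) (P ++ x :: xt) (x :: xt) =
            bRun nbrs f ((P ++ x :: xt) ++ levelAux nbrs (P ++ x :: xt) [] (x :: xt))
              (levelAux nbrs (P ++ x :: xt) [] (x :: xt)) from rfl, hn]
        have hcl' : ∀ y ∈ P ++ x :: xt, ∀ w ∈ nbrs y, w ∈ (P ++ x :: xt) ++ z :: t' := by
          intro y hy w hw
          rcases List.mem_append.mp hy with hy' | hy'
          · exact List.mem_append.mpr (Or.inl (hcl y hy' w hw))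
          · rcases levelAux_complete (x :: xt) nbrs [] (P ++ x :: xt) w y hy' hw with h | h
            · exact List.mem_append.mpr (Or.inl h)
            · exact List.mem_append.mpr (Or.inr (hn ▸ h))
        exact ih (P ++ x :: xt) (z :: t') hndn hcl'

-- ===== VERDICT (by name: the statement is the Claim_ definition above) =====
theorem extract_loop_spec : Claim_equal_extract_loop := by
  intro raw hdom hpre
  simp only [Pre_extract_loop, Bool.and_eq_true] at hpre
  set rows := PySem.Chars.split₀ (PySem.Chars.strip raw.toList) with hrows
  have hS : ∃ r ∈ rows, 'S' ∈ r := by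
    have := hpre.1
    simpa [List.any_eq_true, List.contains_iff_mem] using this
  have hsome := findSA_isSome rows 0 hS
  obtain ⟨s, hs⟩ : ∃ s, findSA rows 0 = some s := by
    cases h : findSA rows 0 with
    | none => rw [h] at hsome; simp at hsome
    | some v => exact ⟨v, rfl⟩
  obtain ⟨n, hn, hs1, hs2, hs3⟩ := findSA_spec rows 0 s hs
  set U := mkV rows with hU
  have hsU : s ∈ U := by
    rw [hU, mem_mkV]
    have he : PySem.List.pyGetD rows ((n : Int)) [] = rows[n] := by
      rw [PySem.List.pyGetD_eq_getElem rows [] (by omega) (by exact_mod_cast hn)]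
      simp
    refine ⟨n, hn, by omega, hs2, ?_⟩
    rw [he]
    exact hs3
  have hpt : ∀ x ∈ U, fcnA rows x = fcnB rows x := fun x hx => fcn_eq rows x hx
  have hcl : ∀ x ∈ U, ∀ z ∈ fcnA rows x, z ∈ U := fun x hx => fcnA_subset rows x hx
  have hfuel : (rows.map List.length).sum = U.length := (length_mkV rows).symm
  set N := fcnA rows s with hN
  have hndN : ([s] ++ N).Nodup := by
    rw [show [s] ++ N = s :: N from rfl, List.nodup_cons]
    exact ⟨self_not_mem_fcnA rows s, fcnA_nodup rows s⟩
  have hsubN : ∀ x ∈ [s] ++ N, x ∈ U := by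
    intro x hx
    rcases List.mem_append.mp hx with hx | hx
    · simp only [List.mem_singleton] at hx
      subst hx
      exact hsU
    · exact hcl s hsU x hx
  have eA : extract_loop raw = aRun (fcnA rows) ((rows.map List.length).sum + 1) [s] N := by
    simp only [extract_loop, ← hrows, hs]
    have h1 : PySem.Set.add PySem.Set.empty s = [s] := by
      rw [set_add_eq]
      simp [PySem.Set.empty]
    have h2 : (fcnA rows s).foldl PySem.Set.add PySem.Set.empty = N := by
      rw [show PySem.Set.empty = ([] : List (Int × Int)) from rfl,
        foldl_add_of_nodup _ _ (by simpa using fcnA_nodup rows s)]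
      simp [hN]
    rw [h1, h2]
  have eB : extract_loop_alt raw = cRun (fcnB rows) ((rows.map List.length).sum + 1) [s] := by
    simp only [extract_loop_alt, ← hrows, ← findS_eq, hs]
    have h1 : PySem.Set.add PySem.Set.empty s = [s] := by
      rw [set_add_eq]
      simp [PySem.Set.empty]
    rw [h1]
  have hcb : cRun (fcnB rows) ((rows.map List.length).sum + 1) [s] =
      bRun (fcnB rows) ((rows.map List.length).sum + 1) [s] [s] := by
    have := cRun_eq_bRun (fcnB rows) ((rows.map List.length).sum + 1) [] [s]
      (by simp) (by simp)
    simpa using this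
  have hsN : ∀ z ∈ fcnB rows s, z ∉ ([s] : List (Int × Int)) := by
    intro z hz
    rw [← hpt s hsU] at hz
    simp only [List.mem_singleton]
    intro h
    exact self_not_mem_fcnA rows s (h ▸ hz)
  have hstepB : bRun (fcnB rows) ((rows.map List.length).sum + 1) [s] [s]
      = bRun (fcnB rows) ((rows.map List.length).sum) ([s] ++ N) N := by
    have hlev : levelAux (fcnB rows) [s] [] [s] = N := by
      rw [levelAux_cons, levelAux_nil, innerAdd_of_disjoint _ _ _ hsN, ← hpt s hsU,
        foldl_add_of_nodup _ _ (by simpa using fcnA_nodup rows s)]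
      simp [hN]
    rw [show bRun (fcnB rows) ((rows.map List.length).sum + 1) [s] [s] =
        bRun (fcnB rows) ((rows.map List.length).sum)
          ([s] ++ levelAux (fcnB rows) [s] [] [s]) (levelAux (fcnB rows) [s] [] [s]) from rfl,
      hlev]
  have hmain : aRun (fcnA rows) ((rows.map List.length).sum + 1) [s] N
      = bRun (fcnB rows) ((rows.map List.length).sum) ([s] ++ N) N := by
    apply main_run (fcnA rows) (fcnB rows) U hpt hcl _ _ [s] N hndN hsubN
    · rw [hfuel]
      simp only [List.length_singleton]
      omega
    · rw [hfuel]
      simp only [List.length_singleton]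
      omega
  show extract_loop raw = extract_loop_alt raw
  rw [eA, eB, hcb, hstepB, hmain]
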